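-- pv_equiv track=rewrite | github.com/cedricusureau/HLA_graph | src/make_raw.py | sorted_dict_by_true_eplet
-- ===== SOURCE A (Python) =====
-- def sorted_dict_by_true_eplet(dico):
--     sorted_dict = {}
--
--     for eplet in dico.keys():
--         sorted_dict[eplet] = []
--
--     for eplet, beads_list in dico.items():
--         for bead in beads_list:
--             if bead[1] == True:
--                 sorted_dict[eplet].append(bead)
--
--     for eplet, beads_list in dico.items():
--         for bead in beads_list:
--             if bead[1] == False:
--                 sorted_dict[eplet].append(bead)
--
--     return sorted_dict
-- ===== SOURCE B (Python) =====
-- def sorted_dict_by_true_eplet(dico):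
--     result = {}
--     for eplet, beads_list in dico.items():
--         trues = []
--         falses = []
--         for bead in beads_list:
--             if bead[1] == True:
--                 trues.append(bead)
--             elif bead[1] == False:
--                 falses.append(bead)
--         result[eplet] = trues + falses
--     return result
-- ===== Notes on version B (the rewrite author's own statement) =====
-- stated objective: simpler
-- what changed: A makes three global passes over the dict (key init, then all True beads, then all False beads, each appending through a dict lookup); B makes a single pass that partitions each eplet's beads into two local lists in one scan and inserts their concatenation once.
import Mathlib
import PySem

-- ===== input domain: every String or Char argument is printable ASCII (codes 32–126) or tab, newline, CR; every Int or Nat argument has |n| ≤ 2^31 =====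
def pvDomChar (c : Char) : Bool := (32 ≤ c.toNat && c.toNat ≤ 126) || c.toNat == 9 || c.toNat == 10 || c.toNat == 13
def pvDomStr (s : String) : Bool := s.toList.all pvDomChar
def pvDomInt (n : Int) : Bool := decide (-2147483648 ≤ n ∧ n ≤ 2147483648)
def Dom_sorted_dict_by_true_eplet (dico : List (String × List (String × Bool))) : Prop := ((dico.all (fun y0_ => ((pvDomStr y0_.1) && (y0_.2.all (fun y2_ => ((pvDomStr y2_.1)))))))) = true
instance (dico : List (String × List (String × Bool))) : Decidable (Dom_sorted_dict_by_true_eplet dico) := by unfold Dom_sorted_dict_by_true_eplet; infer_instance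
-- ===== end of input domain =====

-- B replaces A's three global passes (key init, True pass, False pass) by one pass that
-- partitions each eplet's beads in a single scan; objective: simpler.

-- ===== PORT A =====
def sorted_dict_by_true_eplet (dico : List (String × List (String × Bool))) : List (String × List (String × Bool)) :=
  -- sorted_dict = {}; for eplet in dico.keys(): sorted_dict[eplet] = []
  let d0 : PySem.Dict String (List (String × Bool)) :=
    dico.foldl (fun d p => d.insert p.1 []) PySem.Dict.empty
  -- for eplet, beads_list in dico.items(): for bead in beads_list: if bead[1] == True: append
  let d1 : PySem.Dict String (List (String × Bool)) :=
    dico.foldl (fun d p =>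
      p.2.foldl (fun d b => if b.2 == true then d.modify p.1 [] (fun l => l ++ [b]) else d) d) d0
  -- for eplet, beads_list in dico.items(): for bead in beads_list: if bead[1] == False: append
  let d2 : PySem.Dict String (List (String × Bool)) :=
    dico.foldl (fun d p =>
      p.2.foldl (fun d b => if b.2 == false then d.modify p.1 [] (fun l => l ++ [b]) else d) d) d1
  d2.items

-- ===== PORT B =====
def sorted_dict_by_true_eplet_alt (dico : List (String × List (String × Bool))) : List (String × List (String × Bool)) :=
  (dico.foldl (fun (d : PySem.Dict String (List (String × Bool))) p =>
      let tf := p.2.foldl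
        (fun (tf : List (String × Bool) × List (String × Bool)) b =>
          if b.2 == true then (tf.1 ++ [b], tf.2)
          else if b.2 == false then (tf.1, tf.2 ++ [b])
          else tf)
        ([], [])
      d.insert p.1 (tf.1 ++ tf.2)) PySem.Dict.empty).items

-- ===== PRECONDITION & SPEC =====
-- Pre_ excludes association lists with duplicate keys: they do not represent any Python
-- dict (a dict argument always has distinct keys), so A is never called on them.
def Pre_sorted_dict_by_true_eplet (dico : List (String × List (String × Bool))) : Prop :=
  (dico.map Prod.fst).Nodup
instance (dico : List (String × List (String × Bool))) : Decidable (Pre_sorted_dict_by_true_eplet dico) := by unfold Pre_sorted_dict_by_true_eplet; infer_instance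

def pvWitness_sorted_dict_by_true_eplet : (List (String × List (String × Bool))) :=
  [("e1", [("b1", false), ("b2", true)]), ("e2", [])]

def Spec_sorted_dict_by_true_eplet (dico : List (String × List (String × Bool))) (out : List (String × List (String × Bool))) : Prop := out = sorted_dict_by_true_eplet_alt dico
instance (dico : List (String × List (String × Bool))) (out : List (String × List (String × Bool))) : Decidable (Spec_sorted_dict_by_true_eplet dico out) := by unfold Spec_sorted_dict_by_true_eplet; infer_instance

-- ===== CLAIM (what is proved, stated in full; the proofs are below) =====
def Claim_equal_sorted_dict_by_true_eplet : Prop := ∀ (dico : List (String × List (String × Bool))), Dom_sorted_dict_by_true_eplet dico → Pre_sorted_dict_by_true_eplet dico → Spec_sorted_dict_by_true_eplet dico (sorted_dict_by_true_eplet dico)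

-- ===== LEMMAS AND PROOFS =====

theorem pv_dict_ext (d : PySem.Dict String (List (String × Bool))) (l : List (String × List (String × Bool)))
    (h : d.items = l) : d = PySem.Dict.mk l := by
  cases d; cases h; rfl
theorem pv_modify_mid (xs ys : List (String × List (String × Bool)))
    (k : String) (v : List (String × Bool)) (f : List (String × Bool) → List (String × Bool))
    (hx : ∀ p ∈ xs, p.1 ≠ k) (hy : ∀ p ∈ ys, p.1 ≠ k) :
    ((PySem.Dict.mk (xs ++ (k, v) :: ys)).modify k [] f).items = xs ++ (k, f v) :: ys := by
  have hfind : (xs ++ (k, v) :: ys).find? (fun p => p.1 == k) = some (k, v) := by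
    rw [List.find?_append]
    have : xs.find? (fun p => p.1 == k) = none := by
      rw [List.find?_eq_none]
      intro p hp; simpa using hx p hp
    simp [this]
  have hcon : ((xs ++ (k, v) :: ys).any fun p => p.1 == k) = true := by
    simp
  simp only [PySem.Dict.modify, PySem.Dict.insert, PySem.Dict.contains, PySem.Dict.getD,
    PySem.Dict.get?, hfind, hcon, if_pos]
  simp only [Option.map_some, Option.getD_some, List.map_append, List.map_cons]
  congr 1
  · conv_rhs => rw [← List.map_id xs]
    apply List.map_congr_left
    intro p hp
    simp [hx p hp]
  · congr 1
    · simp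
    · conv_rhs => rw [← List.map_id ys]
      apply List.map_congr_left
      intro p hp
      simp [hy p hp]

theorem pv_inner_fold (P : Bool → Bool) (beads : List (String × Bool))
    (xs ys : List (String × List (String × Bool))) (k : String) (v : List (String × Bool))
    (hx : ∀ p ∈ xs, p.1 ≠ k) (hy : ∀ p ∈ ys, p.1 ≠ k) :
    (beads.foldl (fun d b => if P b.2 then d.modify k [] (fun l => l ++ [b]) else d)
        (PySem.Dict.mk (xs ++ (k, v) :: ys))).items
      = xs ++ (k, v ++ beads.filter (fun b => P b.2)) :: ys := by
  induction beads generalizing v with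
  | nil => simp
  | cons b bs ih =>
    simp only [List.foldl_cons, List.filter_cons]
    by_cases h : P b.2 = true
    · have h2 := pv_modify_mid xs ys k v (fun l => l ++ [b]) hx hy
      have hd : ((PySem.Dict.mk (xs ++ (k, v) :: ys)).modify k [] (fun l => l ++ [b]))
          = PySem.Dict.mk (xs ++ (k, v ++ [b]) :: ys) := by
        rw [show ((PySem.Dict.mk (xs ++ (k, v) :: ys)).modify k [] (fun l => l ++ [b]))
            = PySem.Dict.mk ((PySem.Dict.mk (xs ++ (k, v) :: ys)).modify k [] (fun l => l ++ [b])).items from rfl, h2]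
      rw [if_pos h, hd, ih (v ++ [b])]
      simp [h]
    · rw [if_neg h, ih v]
      simp [h]

theorem pv_pass (P : Bool → Bool) (g : String × List (String × Bool) → List (String × Bool)) :
    ∀ (dico xs : List (String × List (String × Bool))),
    ((xs.map Prod.fst) ++ dico.map Prod.fst).Nodup →
    (dico.foldl (fun d p =>
        p.2.foldl (fun d b => if P b.2 then d.modify p.1 [] (fun l => l ++ [b]) else d) d)
        (PySem.Dict.mk (xs ++ dico.map (fun p => (p.1, g p))))).items
      = xs ++ dico.map (fun p => (p.1, g p ++ p.2.filter (fun b => P b.2))) := by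
  intro dico
  induction dico with
  | nil => intro xs h; simp
  | cons p rest ih =>
    intro xs h
    simp only [List.map_cons, List.foldl_cons]
    have hx : ∀ q ∈ xs, q.1 ≠ p.1 := by
      intro q hq
      have hd := List.disjoint_of_nodup_append h
      intro hqe
      exact (hd (List.mem_map_of_mem hq)) (by simp [hqe])
    have hy : ∀ q ∈ rest.map (fun p => (p.1, g p)), q.1 ≠ p.1 := by
      intro q hq
      obtain ⟨r, hr, rfl⟩ := List.mem_map.mp hq
      have h2 := (List.nodup_append.mp h).2.1
      simp only [List.map_cons, List.nodup_cons] at h2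
      intro hqe
      have hqe' : r.1 = p.1 := hqe
      have : r.1 ∈ rest.map Prod.fst := List.mem_map_of_mem hr
      rw [hqe'] at this
      exact h2.1 this
    have h2 := pv_inner_fold P p.2 xs (rest.map (fun p => (p.1, g p))) p.1 (g p) hx hy
    have hd : (p.2.foldl (fun d b => if P b.2 then d.modify p.1 [] (fun l => l ++ [b]) else d)
          (PySem.Dict.mk (xs ++ (p.1, g p) :: rest.map (fun p => (p.1, g p)))))
        = PySem.Dict.mk ((xs ++ [(p.1, g p ++ p.2.filter (fun b => P b.2))]) ++ rest.map (fun p => (p.1, g p))) := by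
      rw [show (p.2.foldl (fun d b => if P b.2 then d.modify p.1 [] (fun l => l ++ [b]) else d)
          (PySem.Dict.mk (xs ++ (p.1, g p) :: rest.map (fun p => (p.1, g p)))))
          = PySem.Dict.mk (p.2.foldl (fun d b => if P b.2 then d.modify p.1 [] (fun l => l ++ [b]) else d)
          (PySem.Dict.mk (xs ++ (p.1, g p) :: rest.map (fun p => (p.1, g p))))).items from rfl, h2]
      simp
    rw [hd, ih ((xs ++ [(p.1, g p ++ p.2.filter (fun b => P b.2))]))]
    · simp
    · simpa using h

theorem pv_insert_fresh (w : String × List (String × Bool) → List (String × Bool)) :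
    ∀ (dico xs : List (String × List (String × Bool))),
    ((xs.map Prod.fst) ++ dico.map Prod.fst).Nodup →
    (dico.foldl (fun d p => d.insert p.1 (w p)) (PySem.Dict.mk xs)).items
      = xs ++ dico.map (fun p => (p.1, w p)) := by
  intro dico
  induction dico with
  | nil => intro xs h; simp
  | cons p rest ih =>
    intro xs h
    simp only [List.map_cons, List.foldl_cons]
    have hc : (PySem.Dict.mk xs).contains p.1 = false := by
      rw [PySem.Dict.contains_mk]
      simp only [List.any_eq_false]
      intro q hq
      have hd := List.disjoint_of_nodup_append h
      intro hqe
      exact (hd (List.mem_map_of_mem hq)) (by simp [eq_of_beq hqe])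
    have h2 := PySem.Dict.items_insert_of_not_contains (PySem.Dict.mk xs) (w p) hc
    have hd2 : (PySem.Dict.mk xs).insert p.1 (w p) = PySem.Dict.mk (xs ++ [(p.1, w p)]) := by
      rw [show (PySem.Dict.mk xs).insert p.1 (w p)
          = PySem.Dict.mk ((PySem.Dict.mk xs).insert p.1 (w p)).items from rfl, h2]
    rw [hd2, ih (xs ++ [(p.1, w p)])]
    · simp
    · simpa using h

theorem pv_pair (beads : List (String × Bool)) :
    ∀ (t f : List (String × Bool)),
    beads.foldl (fun (tf : List (String × Bool) × List (String × Bool)) b =>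
        if b.2 == true then (tf.1 ++ [b], tf.2)
        else if b.2 == false then (tf.1, tf.2 ++ [b])
        else tf) (t, f)
      = (t ++ beads.filter (fun b => b.2 == true), f ++ beads.filter (fun b => b.2 == false)) := by
  induction beads with
  | nil => intro t f; simp
  | cons b bs ih =>
    intro t f
    cases hb : b.2 <;>
      simp only [List.foldl_cons, hb, List.filter_cons, beq_self_eq_true, if_true, ih] <;>
      simp [List.append_assoc]

theorem pv_main (dico : List (String × List (String × Bool)))
    (hpre : Pre_sorted_dict_by_true_eplet dico) :
    sorted_dict_by_true_eplet dico = sorted_dict_by_true_eplet_alt dico := by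
  have hpre' : ((([]:List (String × List (String × Bool))).map Prod.fst) ++ dico.map Prod.fst).Nodup := by
    simpa using hpre
  simp only [sorted_dict_by_true_eplet, sorted_dict_by_true_eplet_alt]
  have e0 : (dico.foldl (fun d p => d.insert p.1 ([] : List (String × Bool))) PySem.Dict.empty)
      = PySem.Dict.mk ([] ++ dico.map (fun p => (p.1, ([] : List (String × Bool))))) :=
    pv_dict_ext _ _ (pv_insert_fresh (fun _ => []) dico [] hpre')
  rw [e0]
  have e1 : (dico.foldl (fun d p =>
        p.2.foldl (fun d b => if b.2 == true then d.modify p.1 [] (fun l => l ++ [b]) else d) d)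
        (PySem.Dict.mk ([] ++ dico.map (fun p => (p.1, ([] : List (String × Bool)))))))
      = PySem.Dict.mk ([] ++ dico.map (fun p => (p.1, [] ++ p.2.filter (fun b => b.2 == true)))) :=
    pv_dict_ext _ _ (pv_pass (fun x => x == true) (fun _ => []) dico [] hpre')
  rw [e1]
  have e2 : (dico.foldl (fun d p =>
        p.2.foldl (fun d b => if b.2 == false then d.modify p.1 [] (fun l => l ++ [b]) else d) d)
        (PySem.Dict.mk ([] ++ dico.map (fun p => (p.1, [] ++ p.2.filter (fun b => b.2 == true))))))
      = PySem.Dict.mk ([] ++ dico.map (fun p =>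
          (p.1, ([] ++ p.2.filter (fun b => b.2 == true)) ++ p.2.filter (fun b => b.2 == false)))) :=
    pv_dict_ext _ _ (pv_pass (fun x => x == false)
      (fun p => [] ++ p.2.filter (fun b => b.2 == true)) dico [] hpre')
  rw [e2]
  have e3 : (dico.foldl (fun (d : PySem.Dict String (List (String × Bool))) p =>
        d.insert p.1 ((p.2.foldl
          (fun (tf : List (String × Bool) × List (String × Bool)) b =>
            if b.2 == true then (tf.1 ++ [b], tf.2)
            else if b.2 == false then (tf.1, tf.2 ++ [b])
            else tf) ([], [])).1 ++ (p.2.foldl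
          (fun (tf : List (String × Bool) × List (String × Bool)) b =>
            if b.2 == true then (tf.1 ++ [b], tf.2)
            else if b.2 == false then (tf.1, tf.2 ++ [b])
            else tf) ([], [])).2)) PySem.Dict.empty)
      = PySem.Dict.mk ([] ++ dico.map (fun p => (p.1,
          (p.2.foldl
          (fun (tf : List (String × Bool) × List (String × Bool)) b =>
            if b.2 == true then (tf.1 ++ [b], tf.2)
            else if b.2 == false then (tf.1, tf.2 ++ [b])
            else tf) ([], [])).1 ++ (p.2.foldl
          (fun (tf : List (String × Bool) × List (String × Bool)) b =>
            if b.2 == true then (tf.1 ++ [b], tf.2)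
            else if b.2 == false then (tf.1, tf.2 ++ [b])
            else tf) ([], [])).2))) :=
    pv_dict_ext _ _ (pv_insert_fresh _ dico [] hpre')
  rw [e3]
  simp only [List.nil_append]
  apply List.map_congr_left
  intro p _
  rw [pv_pair p.2 [] []]
  simp

-- ===== VERDICT (by name: the statement is the Claim_ definition above) =====
theorem sorted_dict_by_true_eplet_spec : Claim_equal_sorted_dict_by_true_eplet := by
  intro dico _ hpre
  exact pv_main dico hpre
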